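-- pv_equiv track=rewrite | github.com/1r0nw1ll/quantum-arithmetic-research | qa_finance_joint_transition.py | is_obstructed
-- ===== SOURCE A (Python) =====
-- def qa_norm(b, e):
--     return b * b + b * e - e * e     # NEVER b**2 — substrate rule
--
-- INERT = {9: [3], 24: [3, 7]}
--
-- def is_obstructed(b, e, m):
--     r = qa_norm(b, e)
--     inert = INERT.get(m, [])
--     for p in inert:
--         v = 0; n = abs(r)
--         while n > 0 and n % p == 0: v += 1; n //= p
--         if v == 1: return True
--     return False
-- ===== SOURCE B (Python) =====
-- def qa_norm(b, e):
--     return b * b + b * e - e * e     # NEVER b**2 — substrate rule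
--
-- INERT = {9: [3], 24: [3, 7]}
--
-- def is_obstructed(b, e, m):
--     r = qa_norm(b, e)
--     return any(r % p == 0 and r % (p * p) != 0 for p in INERT.get(m, []))
-- ===== Notes on version B (the rewrite author's own statement) =====
-- stated objective: simpler
-- what changed: Replaces the per-prime while-loop that divides |r| down and counts the p-adic valuation with the closed-form test 'p divides r and p*p does not', short-circuited by any().
import Mathlib
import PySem

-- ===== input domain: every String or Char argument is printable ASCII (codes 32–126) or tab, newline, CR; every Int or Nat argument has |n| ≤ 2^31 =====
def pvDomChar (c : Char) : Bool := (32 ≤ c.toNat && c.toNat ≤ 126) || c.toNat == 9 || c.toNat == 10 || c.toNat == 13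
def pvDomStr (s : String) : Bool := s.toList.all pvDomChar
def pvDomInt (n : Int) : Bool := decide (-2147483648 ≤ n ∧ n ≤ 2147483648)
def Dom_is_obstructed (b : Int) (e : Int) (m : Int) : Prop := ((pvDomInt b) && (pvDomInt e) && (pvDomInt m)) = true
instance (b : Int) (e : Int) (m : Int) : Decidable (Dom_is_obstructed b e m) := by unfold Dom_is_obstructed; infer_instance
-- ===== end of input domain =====

-- B replaces A's valuation-counting while-loop (divide |r| by p, count the exponent) with the
-- closed-form test r % p == 0 and r % (p*p) != 0, short-circuited over the inert primes (simpler).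

-- ===== PORT A =====
def qa_normA (b e : Int) : Int := b * b + b * e - e * e

def INERT_A : PySem.Dict Int (List Int) := PySem.Dict.ofList [(9, [3]), (24, [3, 7])]

-- the while loop 'v = 0; n = abs(r); while n > 0 and n % p == 0: v += 1; n //= p', returning v.
-- The '2 ≤ p' conjunct only makes the recursion total; every p drawn from INERT is 3 or 7.
def countV (p : Int) (n : Int) : Nat :=
  if h : 0 < n ∧ PySem.Int.mod n p = 0 ∧ 2 ≤ p then countV p (PySem.Int.floordiv n p) + 1 else 0
termination_by n.toNat
decreasing_by
  have hd : PySem.Int.floordiv n p = n / p := PySem.Int.floordiv_eq_ediv_of_pos (by omega)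
  have hm : PySem.Int.mod n p = n % p := PySem.Int.mod_eq_emod_of_pos (by omega)
  have heq : p * (n / p) = n := by
    have h0 := Int.mul_ediv_add_emod n p
    omega
  have hnn : 0 ≤ n / p := by nlinarith [h.1, h.2.2]
  have hlt : n / p < n := by nlinarith [h.1, h.2.2]
  omega

def loopA (r : Int) : List Int → Bool
  | [] => false
  | p :: ps => if countV p |r| = 1 then true else loopA r ps

def is_obstructed (b : Int) (e : Int) (m : Int) : Bool :=
  let r := qa_normA b e
  let inert := PySem.Dict.getD INERT_A m []
  loopA r inert

-- ===== PORT B =====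
def qa_normB (b e : Int) : Int := b * b + b * e - e * e

def INERT_B : PySem.Dict Int (List Int) := PySem.Dict.ofList [(9, [3]), (24, [3, 7])]

-- any(r % p == 0 and r % (p * p) != 0 for p in inert), short-circuiting
def anyB (r : Int) : List Int → Bool
  | [] => false
  | p :: ps =>
      (decide (PySem.Int.mod r p = 0) && decide (PySem.Int.mod r (p * p) ≠ 0)) || anyB r ps

def is_obstructed_alt (b : Int) (e : Int) (m : Int) : Bool :=
  anyB (qa_normB b e) (PySem.Dict.getD INERT_B m [])

-- ===== PRECONDITION & SPEC =====
def Spec_is_obstructed (b : Int) (e : Int) (m : Int) (out : Bool) : Prop := out = is_obstructed_alt b e m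
instance (b : Int) (e : Int) (m : Int) (out : Bool) : Decidable (Spec_is_obstructed b e m out) := by unfold Spec_is_obstructed; infer_instance

-- ===== CLAIM (what is proved, stated in full; the proofs are below) =====
def Claim_equal_is_obstructed : Prop := ∀ (b : Int) (e : Int) (m : Int), Dom_is_obstructed b e m → Spec_is_obstructed b e m (is_obstructed b e m)

-- ===== LEMMAS AND PROOFS =====

-- characterisation of A's while loop: the p-adic valuation of n is exactly 1
-- iff p divides n and p² does not (for 0 ≤ n; at n = 0 both sides are false).
lemma countV_eq_one (p n : Int) (hp : 2 ≤ p) (hn : 0 ≤ n) :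
    countV p n = 1 ↔ (p ∣ n ∧ ¬ (p * p) ∣ n) := by
  have hp0 : p ≠ 0 := by omega
  rcases eq_or_lt_of_le hn with h0 | hpos
  · rw [← h0, countV]
    simp
  · by_cases hd : p ∣ n
    · obtain ⟨k, rfl⟩ := hd
      have hk : 0 < k := by nlinarith
      have hmod : PySem.Int.mod (p * k) p = 0 :=
        (PySem.Int.mod_eq_zero_iff_dvd (p * k) p).mpr ⟨k, rfl⟩
      have hfd : PySem.Int.floordiv (p * k) p = k := by
        rw [PySem.Int.floordiv_eq_ediv_of_pos (by omega)]
        exact Int.mul_ediv_cancel_left k hp0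
      rw [countV, dif_pos ⟨hpos, hmod, hp⟩, hfd]
      have hL : countV p k + 1 = 1 ↔ countV p k = 0 := by omega
      have hR : (p ∣ p * k ∧ ¬ p * p ∣ p * k) ↔ ¬ p ∣ k := by
        constructor
        · rintro ⟨-, h⟩ hpk
          exact h (mul_dvd_mul_left p hpk)
        · intro h
          exact ⟨⟨k, rfl⟩, fun hc => h ((mul_dvd_mul_iff_left hp0).mp hc)⟩
      rw [hL, hR, countV]
      by_cases hdk : PySem.Int.mod k p = 0
      · have hpk : p ∣ k := (PySem.Int.mod_eq_zero_iff_dvd k p).mp hdk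
        rw [dif_pos ⟨hk, hdk, hp⟩]
        simp [hpk]
      · have hnd : ¬ p ∣ k := fun h => hdk ((PySem.Int.mod_eq_zero_iff_dvd k p).mpr h)
        rw [dif_neg (by intro h; exact hdk h.2.1)]
        simp [hnd]
    · have hmod : PySem.Int.mod n p ≠ 0 :=
        fun h => hd ((PySem.Int.mod_eq_zero_iff_dvd n p).mp h)
      rw [countV, dif_neg (by intro h; exact hmod h.2.1)]
      simp [hd]

-- one prime of the loop, as the boolean B computes
lemma step (p r : Int) (hp : 2 ≤ p) :
    decide (countV p |r| = 1)
      = (decide (PySem.Int.mod r p = 0) && decide (PySem.Int.mod r (p * p) ≠ 0)) := by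
  have h1 : countV p |r| = 1 ↔ (p ∣ r ∧ ¬ (p * p) ∣ r) := by
    rw [countV_eq_one p |r| hp (abs_nonneg r)]
    simp [dvd_abs]
  simp [h1, PySem.Int.mod_eq_zero_iff_dvd]

-- ===== VERDICT (by name: the statement is the Claim_ definition above) =====
theorem is_obstructed_spec : Claim_equal_is_obstructed := by
  intro b e m _
  unfold Spec_is_obstructed is_obstructed is_obstructed_alt
  have hq : qa_normA b e = qa_normB b e := rfl
  set r := qa_normA b e with hr
  by_cases h9 : m = 9
  · subst h9
    have hA : PySem.Dict.getD INERT_A (9 : Int) [] = [3] := by decide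
    have hB : PySem.Dict.getD INERT_B (9 : Int) [] = [3] := by decide
    rw [hA, hB, ← hq]
    simp only [loopA, anyB, Bool.or_false, ← step 3 r (by norm_num)]
    by_cases h : countV 3 |r| = 1 <;> simp [h]
  · by_cases h24 : m = 24
    · subst h24
      have hA : PySem.Dict.getD INERT_A (24 : Int) [] = [3, 7] := by decide
      have hB : PySem.Dict.getD INERT_B (24 : Int) [] = [3, 7] := by decide
      rw [hA, hB, ← hq]
      simp only [loopA, anyB, Bool.or_false, ← step 3 r (by norm_num), ← step 7 r (by norm_num)]
      by_cases h3 : countV 3 |r| = 1 <;> by_cases h7 : countV 7 |r| = 1 <;> simp [h3, h7]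
    · have hDA : INERT_A = PySem.Dict.mk [((9 : Int), [(3 : Int)]), (24, [3, 7])] := by decide
      have hDB : INERT_B = PySem.Dict.mk [((9 : Int), [(3 : Int)]), (24, [3, 7])] := by decide
      have hA : PySem.Dict.getD INERT_A m [] = [] := by
        simp [hDA, PySem.Dict.getD, PySem.Dict.get?,
          beq_iff_eq, Ne.symm h9, Ne.symm h24]
      have hB : PySem.Dict.getD INERT_B m [] = [] := by
        simp [hDB, PySem.Dict.getD, PySem.Dict.get?,
          beq_iff_eq, Ne.symm h9, Ne.symm h24]
      rw [hA, hB]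
      rfl
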